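-- pv_equiv track=rewrite | github.com/KondratevAD/-algorithms | A_Distance_to_the_zero.py | calculation_on_the_left
-- ===== SOURCE A (Python) =====
-- from typing import Union
--
-- def calculation_on_the_left(
--     home_map: Union[str, list],
--     count_place: int
-- ) -> list:
--     """Находит расстояние от пустого участка до дома
--         обратным проходом по карте.
--
--         Ключевые аргументы:
--         count_place -- количество участков
--         home_map -- карта свободных/занятых участков
--         """
--     left_map = list()
--     distace_to_zero = 0
--     for i in range(count_place-1, -1, -1):
--         if home_map[i] == '0':
--             distace_to_zero = 0
--             left_map.append(distace_to_zero)
--         else: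
--             distace_to_zero += 1
--             left_map.append(distace_to_zero)
--     return left_map[::-1]
-- ===== SOURCE B (Python) =====
-- def calculation_on_the_left(home_map, count_place):
--     # Record the indices of all zeros in ascending order, then one forward
--     # pass answers each position from the next recorded zero via a pointer.
--     zeros = [i for i in range(count_place) if home_map[i] == '0']
--     result = []
--     j = 0
--     for i in range(count_place):
--         while j < len(zeros) and zeros[j] < i:
--             j += 1
--         if j < len(zeros):
--             result.append(zeros[j] - i)
--         else:
--             result.append(count_place - i)
--     return result
-- ===== Notes on version B (the rewrite author's own statement) =====
-- stated objective: alternative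
-- what changed: Replaces the backward incremental-counter pass (counter reset at each '0', result reversed at the end) by building an ascending table of zero indices and a forward pass that answers each position from the next recorded zero via an advancing pointer.
import Mathlib
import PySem

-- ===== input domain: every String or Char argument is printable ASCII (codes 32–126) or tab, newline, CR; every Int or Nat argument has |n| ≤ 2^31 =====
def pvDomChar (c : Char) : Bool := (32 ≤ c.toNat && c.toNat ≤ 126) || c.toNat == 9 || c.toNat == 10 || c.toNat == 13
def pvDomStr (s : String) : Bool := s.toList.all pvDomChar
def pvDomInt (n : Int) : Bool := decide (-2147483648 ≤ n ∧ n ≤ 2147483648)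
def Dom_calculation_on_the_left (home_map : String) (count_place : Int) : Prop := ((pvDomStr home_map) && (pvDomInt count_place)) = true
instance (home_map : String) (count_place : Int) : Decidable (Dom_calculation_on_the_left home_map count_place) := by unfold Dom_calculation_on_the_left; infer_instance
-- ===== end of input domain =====

-- B replaces A's backward counter pass by a forward pass over a table of zero indices (alternative decomposition, same cost).

-- home_map[i] == '0' ; inside Pre_ the index is always in range, so the getD default is never hit
def pvCh (cs : List Char) (i : Nat) : Char := (PySem.List.pyGet? cs (i : Int)).getD ' '

-- ===== PORT A =====
-- the loop 'for i in range(count_place-1, -1, -1)' as structural recursion: j+1 remaining ↔ current index i = j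
def pvALoop (cs : List Char) : Nat → Int → List Int → List Int
  | 0, _, acc => acc
  | j+1, dist, acc =>
    if pvCh cs j = '0' then
      pvALoop cs j 0 (acc ++ [0])
    else
      pvALoop cs j (dist + 1) (acc ++ [dist + 1])

def calculation_on_the_left (home_map : String) (count_place : Int) : List Int :=
  (PySem.List.slice? (pvALoop home_map.toList count_place.toNat 0 []) none none (-1)).getD []   -- left_map[::-1]

-- ===== PORT B =====
-- zeros = [i for i in range(count_place) if home_map[i] == '0']  (r remaining, i current index)
def pvBZeros (cs : List Char) : Nat → Nat → List Int
  | 0, _ => []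
  | r+1, i => (if pvCh cs i = '0' then [(i : Int)] else []) ++ pvBZeros cs r (i+1)

-- the forward loop; the advancing pointer j is the dropWhile skipping zeros already passed
def pvBLoop (n : Int) : Nat → Nat → List Int → List Int
  | 0, _, _ => []
  | r+1, i, zs =>
    (match (zs.dropWhile (fun z => z < (i : Int))).head? with
     | some z => z - (i : Int)
     | none => n - (i : Int)) :: pvBLoop n r (i+1) (zs.dropWhile (fun z => z < (i : Int)))

def calculation_on_the_left_alt (home_map : String) (count_place : Int) : List Int :=
  pvBLoop count_place count_place.toNat 0 (pvBZeros home_map.toList count_place.toNat 0)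

-- ===== PRECONDITION & SPEC =====
-- A raises IndexError when count_place exceeds len(home_map); those inputs are excluded.
def Pre_calculation_on_the_left (home_map : String) (count_place : Int) : Prop :=
  count_place ≤ (home_map.toList.length : Int)
instance (home_map : String) (count_place : Int) : Decidable (Pre_calculation_on_the_left home_map count_place) := by
  unfold Pre_calculation_on_the_left; infer_instance

def pvWitness_calculation_on_the_left : String × Int := ("10010", 5)

def Spec_calculation_on_the_left (home_map : String) (count_place : Int) (out : List Int) : Prop := out = calculation_on_the_left_alt home_map count_place
instance (home_map : String) (count_place : Int) (out : List Int) : Decidable (Spec_calculation_on_the_left home_map count_place out) := by unfold Spec_calculation_on_the_left; infer_instance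

-- ===== CLAIM (what is proved, stated in full; the proofs are below) =====
def Claim_equal_calculation_on_the_left : Prop := ∀ (home_map : String) (count_place : Int), Dom_calculation_on_the_left home_map count_place → Pre_calculation_on_the_left home_map count_place → Spec_calculation_on_the_left home_map count_place (calculation_on_the_left home_map count_place)

-- ===== LEMMAS AND PROOFS =====

-- distance looking forward from index i with r cells in the window and seed value past it
def pvDs (cs : List Char) : Nat → Nat → Int → Int
  | 0, _, seed => seed
  | r+1, i, seed => if pvCh cs i = '0' then 0 else pvDs cs r (i+1) seed + 1

-- the intended result for indices i, i+1, …, i+r-1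
def pvFwd (cs : List Char) : Nat → Nat → Int → List Int
  | 0, _, _ => []
  | r+1, i, seed => pvDs cs (r+1) i seed :: pvFwd cs r (i+1) seed

lemma pvDs_snoc (cs : List Char) (r i : Nat) (seed : Int) :
    pvDs cs (r+1) i seed = pvDs cs r i (pvDs cs 1 (i+r) seed) := by
  induction r generalizing i with
  | zero => simp [pvDs]
  | succ r ih =>
    have h1 : pvDs cs (r+1+1) i seed
        = if pvCh cs i = '0' then 0 else pvDs cs (r+1) (i+1) seed + 1 := rfl
    have h2 : pvDs cs (r+1) i (pvDs cs 1 (i+(r+1)) seed)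
        = if pvCh cs i = '0' then 0
          else pvDs cs r (i+1) (pvDs cs 1 (i+(r+1)) seed) + 1 := rfl
    rw [h1, h2, ih (i+1), show i+1+r = i+(r+1) by omega]

lemma pvFwd_snoc (cs : List Char) (r i : Nat) (seed : Int) :
    pvFwd cs (r+1) i seed = pvFwd cs r i (pvDs cs 1 (i+r) seed) ++ [pvDs cs 1 (i+r) seed] := by
  induction r generalizing i with
  | zero => simp [pvFwd]
  | succ r ih =>
    have h1 : pvFwd cs (r+1+1) i seed
        = pvDs cs (r+1+1) i seed :: pvFwd cs (r+1) (i+1) seed := rfl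
    have h2 : pvFwd cs (r+1) i (pvDs cs 1 (i+(r+1)) seed)
        = pvDs cs (r+1) i (pvDs cs 1 (i+(r+1)) seed)
          :: pvFwd cs r (i+1) (pvDs cs 1 (i+(r+1)) seed) := rfl
    rw [h1, h2, ih (i+1), ← pvDs_snoc, show i+1+r = i+(r+1) by omega]
    simp

-- A's loop appends to acc the values for indices j-1, …, 0 (reverse order)
lemma pvALoop_eq (cs : List Char) (j : Nat) (dist : Int) (acc : List Int) :
    pvALoop cs j dist acc = acc ++ (pvFwd cs j 0 dist).reverse := by
  induction j generalizing dist acc with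
  | zero => simp [pvALoop, pvFwd]
  | succ j ih =>
    rw [pvALoop, pvFwd_snoc]
    simp only [Nat.zero_add]
    by_cases h : pvCh cs j = '0'
    · rw [if_pos h, ih, show pvDs cs 1 j dist = if pvCh cs j = '0' then 0 else dist + 1 from rfl,
          if_pos h]
      simp
    · rw [if_neg h, ih, show pvDs cs 1 j dist = if pvCh cs j = '0' then 0 else dist + 1 from rfl,
          if_neg h]
      simp

-- every recorded zero index is ≥ the scan start
lemma pvBZeros_ge (cs : List Char) (r i : Nat) :
    ∀ z ∈ pvBZeros cs r i, (i : Int) ≤ z := by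
  induction r generalizing i with
  | zero => simp [pvBZeros]
  | succ r ih =>
    intro z hz
    rw [pvBZeros] at hz
    rcases List.mem_append.1 hz with h | h
    · split at h <;> simp_all
    · have := ih (i+1) z h; push_cast at this ⊢; omega

lemma pvDropWhile_ge (i : Nat) (l : List Int) (h : ∀ z ∈ l, (i : Int) ≤ z) :
    l.dropWhile (fun z => z < (i : Int)) = l := by
  cases l with
  | nil => rfl
  | cons a t =>
    have : ¬ (a < (i : Int)) := by have := h a (by simp); omega
    simp [List.dropWhile, this]

lemma pvBZeros_dropWhile (cs : List Char) (r i : Nat) :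
    (pvBZeros cs r i).dropWhile (fun z => z < (i : Int)) = pvBZeros cs r i :=
  pvDropWhile_ge i _ (pvBZeros_ge cs r i)

-- head of the zero table gives exactly the forward distance with seed 0 (none ↦ r)
lemma pvBZeros_head (cs : List Char) (r i : Nat) :
    (match (pvBZeros cs r i).head? with
     | some z => z - (i : Int)
     | none => (r : Int)) = pvDs cs r i 0 := by
  induction r generalizing i with
  | zero => simp [pvBZeros, pvDs]
  | succ r ih =>
    have e : pvBZeros cs (r+1) i
        = (if pvCh cs i = '0' then [(i : Int)] else []) ++ pvBZeros cs r (i+1) := rfl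
    have d : pvDs cs (r+1) i 0
        = if pvCh cs i = '0' then 0 else pvDs cs r (i+1) 0 + 1 := rfl
    by_cases h : pvCh cs i = '0'
    · rw [e, if_pos h, d, if_pos h]; simp
    · rw [e, if_neg h, d, if_neg h]
      simp only [List.nil_append]
      have := ih (i+1)
      rcases hh : (pvBZeros cs r (i+1)).head? with _ | z
      all_goals rw [hh] at this
      all_goals simp at this ⊢
      all_goals generalize pvDs cs r (i+1) 0 = q at this ⊢
      all_goals linarith

lemma pvBLoop_eq (cs : List Char) (N : Int) (r i : Nat) (zs : List Int)
    (hzs : zs.dropWhile (fun z => z < (i : Int)) = pvBZeros cs r i)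
    (hN : (i : Int) + (r : Int) = N) :
    pvBLoop N r i zs = pvFwd cs r i 0 := by
  induction r generalizing i zs with
  | zero => simp [pvBLoop, pvFwd]
  | succ r ih =>
    rw [pvBLoop, pvFwd, hzs]
    have hhead := pvBZeros_head cs (r+1) i
    congr 1
    · rcases hh : (pvBZeros cs (r+1) i).head? with _ | z
      all_goals rw [hh] at hhead
      all_goals simp at hhead ⊢
      all_goals push_cast at hhead hN ⊢
      all_goals generalize pvDs cs (r+1) i 0 = q at hhead ⊢
      all_goals linarith
    · apply ih
      · rw [show pvBZeros cs (r+1) i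
            = (if pvCh cs i = '0' then [(i : Int)] else []) ++ pvBZeros cs r (i+1) from rfl]
        by_cases h : pvCh cs i = '0'
        · rw [if_pos h]
          simp only [List.singleton_append, List.dropWhile]
          have hlt : decide ((i : Int) < ((i+1 : Nat) : Int)) = true := by
            simp
          rw [hlt]
          simpa using pvBZeros_dropWhile cs r (i+1)
        · rw [if_neg h]
          simpa using pvBZeros_dropWhile cs r (i+1)
      · push_cast at hN ⊢; omega

-- ===== VERDICT (by name: the statement is the Claim_ definition above) =====
theorem calculation_on_the_left_spec : Claim_equal_calculation_on_the_left := by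
  intro home_map count_place _ _
  unfold Spec_calculation_on_the_left calculation_on_the_left calculation_on_the_left_alt
  rw [PySem.List.slice?_none_none_neg_one]
  simp only [Option.getD_some]
  by_cases h : 0 ≤ count_place
  · rw [pvALoop_eq,
        pvBLoop_eq home_map.toList count_place count_place.toNat 0
          (pvBZeros home_map.toList count_place.toNat 0)
          (pvBZeros_dropWhile home_map.toList count_place.toNat 0)
          (by simp [Int.toNat_of_nonneg h])]
    simp
  · -- count_place < 0: range(count_place-1,-1,-1) and range(count_place) are both empty
    have h0 : count_place.toNat = 0 := by omega
    rw [h0]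
    simp [pvALoop, pvBLoop]
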